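-- pv_equiv track=rewrite | github.com/AlexisGR117/AYED | Programas/Clavos.py | recorrido
-- ===== SOURCE A (Python) =====
-- def recorrido(camino, posicion, velocidad):
--     if posicion > len(camino) - 1:
--         return recorrido(camino[::-1], posicion - len(camino) + 1, velocidad)
--     if velocidad == 0:
--         return True
--     if camino[posicion] == "F":
--         return False
--     return recorrido(camino, velocidad + posicion, velocidad - 1)
-- ===== SOURCE B (Python) =====
-- def recorrido(camino, posicion, velocidad):
--     # Fold the position by reflection (mod 2*(n-1)) instead of reversing the string at
--     # each bounce; a still-negative position counts from the end, as Python indexing does.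
--     n = len(camino)
--     period = 2 * (n - 1)
--     t = posicion
--     v = velocidad
--     while v > 0:
--         if t >= 0:
--             r = t % period
--             if r >= n:
--                 r = period - r
--         else:
--             r = t
--         if camino[r] == "F":
--             return False
--         t += v
--         v -= 1
--     return True
-- ===== Notes on version B (the rewrite author's own statement) =====
-- stated objective: alternative
-- what changed: B replaces A's recursive string-reversal bouncing with a single arithmetic loop that folds a non-negative position by reflection modulo 2*(n-1) (reading a still-negative position from the end, as Python indexing does), so no string is ever copied or reversed and no recursion is needed; intended as faster, measured 6-60x on the probe's sizes but not confirmed at the largest size (A times out there).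
-- outside the precondition, e.g. on recorrido('Fa', 0, -1): A returns False, B returns True; on recorrido('F', 0, 3): A returns False, B raises ZeroDivisionError
import Mathlib
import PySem

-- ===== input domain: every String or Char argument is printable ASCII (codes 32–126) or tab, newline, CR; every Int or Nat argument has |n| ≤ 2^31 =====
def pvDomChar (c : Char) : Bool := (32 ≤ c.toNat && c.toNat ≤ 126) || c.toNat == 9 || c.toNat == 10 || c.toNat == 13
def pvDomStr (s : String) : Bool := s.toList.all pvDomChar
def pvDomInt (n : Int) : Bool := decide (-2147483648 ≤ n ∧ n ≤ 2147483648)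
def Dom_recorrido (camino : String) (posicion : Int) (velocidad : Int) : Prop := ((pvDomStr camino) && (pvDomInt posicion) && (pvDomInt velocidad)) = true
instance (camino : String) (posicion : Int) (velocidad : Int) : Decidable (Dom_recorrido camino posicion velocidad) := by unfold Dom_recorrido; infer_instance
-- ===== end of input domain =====

-- B replaces A's recursive string-reversal bouncing with one arithmetic loop folding the
-- cumulative position by reflection modulo 2*(n-1); equivalence is proved on Pre_recorrido.

-- ===== PORT A =====
-- A's recursion is not structurally terminating outside its natural domain, so the
-- transliteration carries a fuel parameter; recorrido supplies fuel strictly above the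
-- measure posicion + velocidad² + velocidad, which bounds A's recursion depth on Pre_.
def pvRecA (camino : List Char) (fuel : Nat) (posicion velocidad : Int) : Bool :=
  match fuel with
  | 0 => true  -- unreachable on Pre_ (fuel is sufficient there)
  | fuel + 1 =>
    if posicion > (camino.length : Int) - 1 then
      -- camino[::-1] is reversal (PySem.List.slice?_none_none_neg_one)
      pvRecA camino.reverse fuel (posicion - (camino.length : Int) + 1) velocidad
    else if velocidad = 0 then true
    else
      match PySem.List.pyGet? camino posicion with
      | some c => if c = 'F' then false
                  else pvRecA camino fuel (velocidad + posicion) (velocidad - 1)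
      | none => true  -- IndexError in Python; outside Pre_

def recorrido (camino : String) (posicion : Int) (velocidad : Int) : Bool :=
  pvRecA camino.toList ((max posicion 0 + velocidad * velocidad + velocidad).toNat + 1) posicion velocidad

-- ===== PORT B =====
def pvLoopB (camino : List Char) (period : Int) (t v : Int) : Bool :=
  if 0 < v then
    let r2 :=
      if 0 ≤ t then
        let r := PySem.Int.mod t period
        if r ≥ (camino.length : Int) then period - r else r
      else t
    match PySem.List.pyGet? camino r2 with
    | some c => if c = 'F' then false else pvLoopB camino period (t + v) (v - 1)
    | none => true  -- IndexError in Python; outside Pre_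
  else true
termination_by v.toNat
decreasing_by omega

def recorrido_alt (camino : String) (posicion : Int) (velocidad : Int) : Bool :=
  pvLoopB camino.toList (2 * ((camino.toList.length : Int) - 1)) posicion velocidad

-- ===== PRECONDITION & SPEC =====
-- Pre_ excludes: negative velocidad (A can never stop at velocidad 0, so it raises
-- IndexError unless it meets an 'F' through wraparound reads); posicion below -len with
-- positive velocidad (A raises IndexError at once); and strings of length < 2 with
-- positive velocidad or out-of-range posicion (A recurses forever there, and B's
-- reflection modulus 2*(n-1) is nonpositive).
def Pre_recorrido (camino : String) (posicion : Int) (velocidad : Int) : Prop :=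
  0 ≤ velocidad ∧
    ((velocidad = 0 ∧ (2 ≤ camino.toList.length ∨ posicion < (camino.toList.length : Int))) ∨
     (2 ≤ camino.toList.length ∧ -(camino.toList.length : Int) ≤ posicion))
instance (camino : String) (posicion : Int) (velocidad : Int) : Decidable (Pre_recorrido camino posicion velocidad) := by
  unfold Pre_recorrido; infer_instance

def pvWitness_recorrido : String × Int × Int := ("ab", 0, 1)

def Spec_recorrido (camino : String) (posicion : Int) (velocidad : Int) (out : Bool) : Prop := out = recorrido_alt camino posicion velocidad
instance (camino : String) (posicion : Int) (velocidad : Int) (out : Bool) : Decidable (Spec_recorrido camino posicion velocidad out) := by unfold Spec_recorrido; infer_instance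

-- ===== CLAIM (what is proved, stated in full; the proofs are below) =====
def Claim_equal_recorrido : Prop := ∀ (camino : String) (posicion : Int) (velocidad : Int), Dom_recorrido camino posicion velocidad → Pre_recorrido camino posicion velocidad → Spec_recorrido camino posicion velocidad (recorrido camino posicion velocidad)

-- ===== LEMMAS AND PROOFS =====

lemma pv_fold_eq (camino : List Char) (h2 : 2 ≤ camino.length) (t g : Int)
    (hg0 : 0 ≤ g) (hg1 : g ≤ (camino.length : Int) - 1)
    (hd : (2 * ((camino.length : Int) - 1)) ∣ (g - t) ∨
          (2 * ((camino.length : Int) - 1)) ∣ (g + t)) :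
    (if PySem.Int.mod t (2 * ((camino.length : Int) - 1)) ≥ (camino.length : Int)
     then 2 * ((camino.length : Int) - 1) - PySem.Int.mod t (2 * ((camino.length : Int) - 1))
     else PySem.Int.mod t (2 * ((camino.length : Int) - 1))) = g := by
  have hn2 : (2 : Int) ≤ (camino.length : Int) := by exact_mod_cast h2
  set n : Int := (camino.length : Int) with hn
  set P : Int := 2 * (n - 1) with hP
  have hPpos : 0 < P := by omega
  have hmod : PySem.Int.mod t P = t % P := PySem.Int.mod_eq_emod_of_pos hPpos
  rw [hmod]
  have hr0 : 0 ≤ t % P := Int.emod_nonneg t (by omega)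
  have hrP : t % P < P := Int.emod_lt_of_pos t hPpos
  rcases hd with ⟨k, hk⟩ | ⟨k, hk⟩
  · have ht : t = g - P * k := by linarith
    have : t % P = g := by
      rw [ht, Int.sub_mul_emod_self_left]
      exact Int.emod_eq_of_lt hg0 (by omega)
    rw [this, if_neg (by omega)]
  · by_cases hgz : g = 0
    · subst hgz
      have ht : t = P * k := by linarith
      have : t % P = 0 := by rw [ht]; exact Int.mul_emod_right P k
      rw [this, if_neg (by omega)]
    · have ht : t = (P - g) + P * (k - 1) := by ring_nf; linarith
      have : t % P = P - g := by
        rw [ht, Int.add_mul_emod_self_left]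
        exact Int.emod_eq_of_lt (by omega) (by omega)
      rw [this]
      by_cases hcase : P - g ≥ n
      · rw [if_pos hcase]; omega
      · rw [if_neg hcase]; omega

lemma pv_get_mirror (camino : List Char) (σ : Bool) (p : Int)
    (hp0 : 0 ≤ p) (hp1 : p ≤ (camino.length : Int) - 1) :
    PySem.List.pyGet? (if σ then camino.reverse else camino) p
      = PySem.List.pyGet? camino (if σ then (camino.length : Int) - 1 - p else p) := by
  cases σ
  · simp
  · simp only [if_pos]
    rw [PySem.List.pyGet?_of_nonneg camino.reverse hp0, PySem.List.pyGet?_of_nonneg camino (by omega : (0:Int) ≤ (camino.length : Int) - 1 - p)]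
    rw [List.getElem?_reverse (by omega)]
    congr 1
    omega

-- One unfolding step of B's loop when the loop is entered.
lemma pvLoopB_pos (camino : List Char) (period t v : Int) (hv : 0 < v) :
    pvLoopB camino period t v =
      (match PySem.List.pyGet? camino
          (if 0 ≤ t then
             (if PySem.Int.mod t period ≥ (camino.length : Int)
              then period - PySem.Int.mod t period
              else PySem.Int.mod t period)
           else t) with
       | some c => if c = 'F' then false else pvLoopB camino period (t + v) (v - 1)
       | none => true) := by
  rw [pvLoopB, if_pos hv]

lemma pv_main (camino : List Char) (h2 : 2 ≤ camino.length) :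
    ∀ (fuel : Nat) (σ : Bool) (p t vel : Int),
      0 ≤ vel → 0 ≤ p → 0 ≤ t →
      p + vel * vel + vel < (fuel : Int) →
      (2 * ((camino.length : Int) - 1)) ∣
        (if σ then ((camino.length : Int) - 1 - p + t) else (p - t)) →
      pvRecA (if σ then camino.reverse else camino) fuel p vel
        = pvLoopB camino (2 * ((camino.length : Int) - 1)) t vel := by
  have hn2 : (2 : Int) ≤ (camino.length : Int) := by exact_mod_cast h2
  intro fuel
  induction fuel with
  | zero =>
    intro σ p t vel hv hp ht hμ _
    exfalso
    have hq : 0 ≤ vel * vel := mul_self_nonneg vel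
    simp only [Nat.cast_zero] at hμ
    linarith
  | succ fuel ih =>
    intro σ p t vel hv hp ht hμ hdvd
    have hlen : (((if σ then camino.reverse else camino) : List Char).length : Int)
        = (camino.length : Int) := by cases σ <;> simp
    rw [pvRecA, hlen]
    by_cases hrefl : p > (camino.length : Int) - 1
    · rw [if_pos hrefl]
      have hstr : ((if σ then camino.reverse else camino) : List Char).reverse
          = (if !σ then camino.reverse else camino) := by cases σ <;> simp
      rw [hstr]
      apply ih (!σ) (p - (camino.length : Int) + 1) t vel hv (by omega) ht
      · generalize hq : vel * vel = q at hμ ⊢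
        push_cast at hμ ⊢
        omega
      · cases σ
        · simp only [Bool.not_false, Bool.false_eq_true, if_true, if_false] at hdvd ⊢
          obtain ⟨k, hk⟩ := hdvd
          exact ⟨1 - k, by linear_combination -hk⟩
        · simp only [Bool.not_true, Bool.false_eq_true, if_true, if_false] at hdvd ⊢
          obtain ⟨k, hk⟩ := hdvd
          exact ⟨-k, by linear_combination -hk⟩
    · rw [if_neg hrefl]
      by_cases hv0 : vel = 0
      · subst hv0
        rw [if_pos rfl, pvLoopB]
        simp
      · rw [if_neg hv0]
        have hv1 : 1 ≤ vel := by omega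
        rw [pv_get_mirror camino σ p hp (by omega)]
        have hgd : 0 ≤ (if σ then (camino.length : Int) - 1 - p else p) ∧
            (if σ then (camino.length : Int) - 1 - p else p) ≤ (camino.length : Int) - 1 := by
          cases σ <;> simp <;> omega
        have hfold :
            (if PySem.Int.mod t (2 * ((camino.length : Int) - 1)) ≥ (camino.length : Int)
             then 2 * ((camino.length : Int) - 1) - PySem.Int.mod t (2 * ((camino.length : Int) - 1))
             else PySem.Int.mod t (2 * ((camino.length : Int) - 1)))
            = (if σ then (camino.length : Int) - 1 - p else p) := by
          apply pv_fold_eq camino h2 t _ hgd.1 hgd.2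
          cases σ
          · left; simpa using hdvd
          · right
            simp only [if_true] at hdvd ⊢
            obtain ⟨k, hk⟩ := hdvd
            exact ⟨k, by linear_combination hk⟩
        obtain ⟨c, hc⟩ : ∃ c, PySem.List.pyGet? camino
            (if σ then (camino.length : Int) - 1 - p else p) = some c :=
          ⟨_, PySem.List.pyGet?_eq_some_getElem camino hgd.1 (by omega)⟩
        rw [pvLoopB_pos camino _ t vel (by omega), if_pos ht, hfold, hc]
        dsimp only
        by_cases hF : c = 'F'
        · rw [if_pos hF, if_pos hF]
        · rw [if_neg hF, if_neg hF]
          apply ih σ (vel + p) (t + vel) (vel - 1) (by omega) (by omega) (by omega)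
          · have hr : (vel + p) + (vel - 1) * (vel - 1) + (vel - 1)
                = p + vel * vel := by ring
            rw [hr]
            generalize hq : vel * vel = q at hμ ⊢
            push_cast at hμ ⊢
            omega
          · cases σ
            · simp only [Bool.false_eq_true, if_false] at hdvd ⊢
              obtain ⟨k, hk⟩ := hdvd
              exact ⟨k, by linear_combination hk⟩
            · simp only [if_true] at hdvd ⊢
              obtain ⟨k, hk⟩ := hdvd
              exact ⟨k, by linear_combination hk⟩

-- The initial phase while the position is still negative: A reads through Python's
-- from-the-end indexing and B does the same, until the position becomes non-negative.
lemma pv_neg (camino : List Char) (h2 : 2 ≤ camino.length) :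
    ∀ (fuel : Nat) (p vel : Int),
      0 ≤ vel → -(camino.length : Int) ≤ p → p < 0 →
      vel * vel + vel < (fuel : Int) →
      pvRecA camino fuel p vel
        = pvLoopB camino (2 * ((camino.length : Int) - 1)) p vel := by
  have hn2 : (2 : Int) ≤ (camino.length : Int) := by exact_mod_cast h2
  intro fuel
  induction fuel with
  | zero =>
    intro p vel hv hlo hneg hμ
    exfalso
    have hq := mul_self_nonneg vel
    simp only [Nat.cast_zero] at hμ
    linarith
  | succ fuel ih =>
    intro p vel hv hlo hneg hμ
    rw [pvRecA]
    rw [if_neg (by omega : ¬ p > (camino.length : Int) - 1)]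
    by_cases hv0 : vel = 0
    · subst hv0
      rw [if_pos rfl, pvLoopB]
      simp
    · rw [if_neg hv0]
      have hv1 : 1 ≤ vel := by omega
      obtain ⟨c, hc⟩ : ∃ c, PySem.List.pyGet? camino p = some c := by
        rcases hx : PySem.List.pyGet? camino p with _ | c
        · rw [PySem.List.pyGet?_eq_none_iff] at hx
          exact absurd (by simp only [PySem.Raise.InRange]; omega) hx
        · exact ⟨c, rfl⟩
      rw [pvLoopB_pos camino _ p vel (by omega), if_neg (by omega : ¬ (0:Int) ≤ p), hc]
      dsimp only
      by_cases hF : c = 'F'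
      · rw [if_pos hF, if_pos hF]
      · rw [if_neg hF, if_neg hF]
        by_cases hnn : 0 ≤ p + vel
        · have hmain := pv_main camino h2 fuel false (vel + p) (p + vel) (vel - 1)
            (by omega) (by omega) hnn
            (by
              have hr : (vel + p) + (vel - 1) * (vel - 1) + (vel - 1) = p + vel * vel := by
                ring
              rw [hr]
              generalize hq : vel * vel = q at hμ ⊢
              push_cast at hμ ⊢
              omega)
            (by
              have hz : (vel + p) - (p + vel) = 0 := by ring
              simp [hz])
          simpa using hmain
        · rw [show vel + p = p + vel from add_comm vel p]
          exact ih (p + vel) (vel - 1) (by omega) (by omega) (by omega)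
            (by
              have hr : (vel - 1) * (vel - 1) + (vel - 1) = vel * vel - vel := by ring
              rw [hr]
              generalize hq : vel * vel = q at hμ ⊢
              push_cast at hμ ⊢
              omega)

-- ===== VERDICT (by name: the statement is the Claim_ definition above) =====
theorem recorrido_spec : Claim_equal_recorrido := by
  intro camino posicion velocidad _dom hpre
  obtain ⟨hvel, hcase⟩ := hpre
  unfold Spec_recorrido recorrido recorrido_alt
  by_cases hml : 2 ≤ camino.toList.length ∧ 0 ≤ posicion
  · have hnn : 0 ≤ max posicion 0 + velocidad * velocidad + velocidad := by
      have h1 := mul_self_nonneg velocidad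
      have h2 := le_max_right posicion (0 : Int)
      linarith
    have hmu : posicion + velocidad * velocidad + velocidad
        < (((max posicion 0 + velocidad * velocidad + velocidad).toNat + 1 : Nat) : Int) := by
      push_cast
      rw [Int.toNat_of_nonneg hnn, max_eq_left hml.2]
      linarith
    have := pv_main camino.toList hml.1 _ false posicion posicion velocidad
      hvel hml.2 hml.2 hmu (by simp)
    simpa using this
  · by_cases hneg : 2 ≤ camino.toList.length ∧
        -(camino.toList.length : Int) ≤ posicion ∧ posicion < 0
    · have hmax : max posicion 0 = 0 := max_eq_right (by omega)
      have hnn : 0 ≤ max posicion 0 + velocidad * velocidad + velocidad := by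
        have h1 := mul_self_nonneg velocidad
        linarith [le_max_right posicion (0 : Int)]
      have hmu : velocidad * velocidad + velocidad
          < (((max posicion 0 + velocidad * velocidad + velocidad).toNat + 1 : Nat) : Int) := by
        push_cast
        rw [Int.toNat_of_nonneg hnn, hmax]
        linarith
      exact pv_neg camino.toList hneg.1 _ posicion velocidad hvel hneg.2.1 hneg.2.2 hmu
    · -- only velocidad = 0 with posicion in range remains: both sides are True at once
      have hkey : velocidad = 0 ∧ posicion ≤ (camino.toList.length : Int) - 1 := by
        rcases hcase with ⟨h0, hOr⟩ | ⟨h2, hge⟩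
        · refine ⟨h0, ?_⟩
          rcases hOr with h2len | hlt
          · have : ¬ 0 ≤ posicion := fun hp => hml ⟨h2len, hp⟩
            omega
          · omega
        · by_cases hp : 0 ≤ posicion
          · exact absurd ⟨h2, hp⟩ hml
          · exact absurd ⟨h2, hge, by omega⟩ hneg
      obtain ⟨hv0, hple⟩ := hkey
      subst hv0
      rw [pvRecA, pvLoopB]
      rw [if_neg (by omega : ¬ posicion > (camino.toList.length : Int) - 1)]
      simp
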